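-- pv_equiv track=rewrite | github.com/khj1998/ProblemSolving | 프로그래머스/unrated/155652. 둘만의 암호/둘만의 암호.py | solution
-- ===== SOURCE A (Python) =====
-- def solution(s, skip, index):
--     answer = ''
--
--     for c in s:
--         c_ord = ord(c)
--         cnt = 1
--
--         while cnt<=index:
--             c_ord +=1
--
--             if c_ord > 122:
--                 c_ord = 97
--                 if chr(c_ord) in skip:
--                     continue
--                 else:
--                     cnt+=1
--             else:
--                 if chr(c_ord) in skip:
--                     continue
--                 else:
--                     cnt+=1
--
--         answer+=chr(c_ord)
--
--     return answer
-- ===== SOURCE B (Python) =====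
-- def solution(s, skip, index):
--     # Precompute the allowed cycle once; per character use a bounded tail scan
--     # plus modular arithmetic instead of stepping `index` times.
--     allowed_cycle = [c for c in 'abcdefghijklmnopqrstuvwxyz' if c not in skip]
--     m = len(allowed_cycle)
--     out = []
--     for ch in s:
--         if index <= 0:
--             out.append(ch)
--             continue
--         o = ord(ch)
--         tail = [chr(i) for i in range(o + 1, 123) if chr(i) not in skip]
--         if index <= len(tail):
--             out.append(tail[index - 1])
--         else:
--             r = index - len(tail)
--             out.append(allowed_cycle[(r - 1) % m])
--     return ''.join(out)
-- ===== Notes on version B (the rewrite author's own statement) =====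
-- stated objective: faster
-- what changed: Instead of stepping the cipher one character at a time `index` times per input character (re-checking skip membership at every step), B precomputes the allowed a-z cycle once and, per character, scans the bounded tail up to 'z' and then lands with a single modular index (r-1) % m into the allowed cycle.
import Mathlib
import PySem

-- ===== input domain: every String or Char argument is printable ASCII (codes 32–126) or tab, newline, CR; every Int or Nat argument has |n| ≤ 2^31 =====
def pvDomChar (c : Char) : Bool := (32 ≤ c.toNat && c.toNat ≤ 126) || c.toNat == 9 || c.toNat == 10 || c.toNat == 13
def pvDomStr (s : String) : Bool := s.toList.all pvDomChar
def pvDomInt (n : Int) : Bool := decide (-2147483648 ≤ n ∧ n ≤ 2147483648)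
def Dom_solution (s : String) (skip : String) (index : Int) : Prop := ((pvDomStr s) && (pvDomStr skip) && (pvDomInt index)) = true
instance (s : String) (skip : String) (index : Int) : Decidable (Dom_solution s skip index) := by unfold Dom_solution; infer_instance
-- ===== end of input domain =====

-- B replaces A's per-character stepping loop (O(index) steps per character) by a
-- precomputed allowed cycle and one modular index per character (return value only).

-- ===== PORT A =====
-- the Python while-loop, as fuel recursion (fuel is bookkeeping only; under
-- Pre_solution the supplied fuel is more than the loop's exact step count)
def solLoopA (skip : String) (index : Int) : Nat → Int → Int → Int
  | 0, c_ord, _ => c_ord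
  | Nat.succ fuel, c_ord, cnt =>
    if cnt ≤ index then
      let c1 := c_ord + 1
      if c1 > 122 then
        -- c_ord = 97
        if skip.toList.contains (Char.ofNat 97) then solLoopA skip index fuel 97 cnt
        else solLoopA skip index fuel 97 (cnt + 1)
      else
        if skip.toList.contains (Char.ofNat c1.toNat) then solLoopA skip index fuel c1 cnt
        else solLoopA skip index fuel c1 (cnt + 1)
    else c_ord

def solution (s : String) (skip : String) (index : Int) : String :=
  String.ofList (s.toList.foldl
    (fun answer c =>
      answer ++ [Char.ofNat (solLoopA skip index (26 * index.toNat + 200) (c.toNat : Int) 1).toNat])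
    [])

-- ===== PORT B =====
def solution_alt (s : String) (skip : String) (index : Int) : String :=
  let allowedCycle := "abcdefghijklmnopqrstuvwxyz".toList.filter (fun c => !(skip.toList.contains c))
  let m : Int := allowedCycle.length
  String.ofList (s.toList.map (fun ch =>
    if index ≤ 0 then ch
    else
      let o : Int := (ch.toNat : Int)
      let tail := ((PySem.List.pyRange (o + 1) 123 1).map (fun i => Char.ofNat i.toNat)).filter
        (fun c => !(skip.toList.contains c))
      if index ≤ (tail.length : Int) then (PySem.List.pyGet? tail (index - 1)).getD 'a'
      else
        let r := index - (tail.length : Int)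
        (PySem.List.pyGet? allowedCycle (PySem.Int.mod (r - 1) m)).getD 'a'))

-- ===== PRECONDITION & SPEC =====
-- Pre_ excludes exactly the inputs on which A's while-loop never terminates:
-- index ≥ 1, every letter a–z is in skip, and some character of s needs to wrap
-- past 'z' (A returns on no such input, so nothing A returns on is excluded).
def Pre_solution (s : String) (skip : String) (index : Int) : Prop :=
  index ≤ 0
  ∨ (∃ c ∈ "abcdefghijklmnopqrstuvwxyz".toList, skip.toList.contains c = false)
  ∨ ∀ c ∈ s.toList,
      index ≤ (((PySem.List.pyRange ((c.toNat : Int) + 1) 123 1).filter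
        (fun i => !(skip.toList.contains (Char.ofNat i.toNat)))).length : Int)
instance (s : String) (skip : String) (index : Int) : Decidable (Pre_solution s skip index) := by
  unfold Pre_solution; infer_instance

def pvWitness_solution : String × String × Int := ("hello", "abc", 0)

def Spec_solution (s : String) (skip : String) (index : Int) (out : String) : Prop := out = solution_alt s skip index
instance (s : String) (skip : String) (index : Int) (out : String) : Decidable (Spec_solution s skip index out) := by unfold Spec_solution; infer_instance

-- ===== CLAIM (what is proved, stated in full; the proofs are below) =====
def Claim_equal_solution : Prop := ∀ (s : String) (skip : String) (index : Int), Dom_solution s skip index → Pre_solution s skip index → Spec_solution s skip index (solution s skip index)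

-- ===== LEMMAS AND PROOFS =====

-- allowed-position predicate and the allowed positions of the segment (o, 122]
def psk (skip : String) (i : Int) : Bool := !(skip.toList.contains (Char.ofNat i.toNat))

def seg (skip : String) (o : Int) : List Int :=
  (PySem.List.pyRange (o + 1) 123 1).filter (psk skip)

-- A's loop with the count replaced by the REMAINING number of allowed steps
def loopR (skip : String) : Nat → Int → Nat → Int
  | 0, o, _ => o
  | Nat.succ fuel, o, r =>
    if r = 0 then o
    else
      let o' := if o + 1 > 122 then 97 else o + 1
      if psk skip o' then loopR skip fuel o' (r - 1) else loopR skip fuel o' r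

theorem loopR_zero (skip : String) (fuel : Nat) (o : Int) : loopR skip fuel o 0 = o := by
  cases fuel <;> simp [loopR]

theorem loopA_eq_loopR (skip : String) (index : Int) (fuel : Nat) :
    ∀ (o cnt : Int), solLoopA skip index fuel o cnt = loopR skip fuel o (index + 1 - cnt).toNat := by
  induction fuel with
  | zero => intro o cnt; rfl
  | succ fuel ih =>
    intro o cnt
    by_cases hc : cnt ≤ index
    · have hr0 : ¬ (index + 1 - cnt).toNat = 0 := by omega
      have hsub : (index + 1 - cnt).toNat - 1 = (index + 1 - (cnt + 1)).toNat := by omega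
      simp only [solLoopA, loopR, if_pos hc, if_neg hr0]
      by_cases hw : o + 1 > 122
      · simp only [if_pos hw]
        simp [psk, ih]
        split_ifs <;> congr 1 <;> omega
      · simp only [if_neg hw]
        simp [psk, ih]
        split_ifs <;> congr 1 <;> omega
    · have hr0 : (index + 1 - cnt).toNat = 0 := by omega
      simp [solLoopA, loopR, if_neg hc, hr0]

theorem seg_nil (skip : String) {o : Int} (h : 122 ≤ o) : seg skip o = [] := by
  unfold seg
  rw [PySem.List.pyRange_one_eq_nil (by omega)]
  rfl

theorem seg_cons (skip : String) {o : Int} (h : o < 122) :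
    seg skip o = if psk skip (o + 1) then (o + 1) :: seg skip (o + 1) else seg skip (o + 1) := by
  unfold seg
  rw [PySem.List.pyRange_one_cons (by omega : o + 1 < 123)]
  rw [List.filter_cons]

theorem wrap96 (skip : String) (f : Nat) {o : Int} {r : Nat} (ho : 122 ≤ o) (hr : 1 ≤ r) :
    loopR skip (f + 1) o r = loopR skip (f + 1) 96 r := by
  have hr0 : ¬ r = 0 := by omega
  have h1 : o + 1 > 122 := by omega
  simp only [loopR, if_neg hr0, if_pos h1]
  norm_num

theorem scan_hit (skip : String) :
    ∀ (k : Nat) (o : Int) (r fuel : Nat), (122 - o).toNat = k → o ≤ 122 → 1 ≤ r →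
      r ≤ (seg skip o).length → k ≤ fuel →
      loopR skip fuel o r = (seg skip o).getD (r - 1) 0 := by
  intro k
  induction k with
  | zero =>
    intro o r fuel hk ho hr hlen hfuel
    rw [seg_nil skip (by omega)] at hlen
    simp at hlen; omega
  | succ k ih =>
    intro o r fuel hk ho hr hlen hfuel
    have ho' : o < 122 := by omega
    obtain ⟨f, rfl⟩ : ∃ f, fuel = f + 1 := ⟨fuel - 1, by omega⟩
    have hr0 : ¬ r = 0 := by omega
    have hnw : ¬ (o + 1 > 122) := by omega
    rw [seg_cons skip ho'] at hlen ⊢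
    by_cases hp : psk skip (o + 1)
    · simp only [loopR, if_neg hr0, if_neg hnw, if_pos hp] at hlen ⊢
      by_cases hr1 : r = 1
      · subst hr1
        simp [loopR_zero]
      · rw [ih (o + 1) (r - 1) f (by omega) (by omega) (by omega)
          (by simp at hlen; omega) (by omega)]
        have h2 : r - 1 = (r - 2) + 1 := by omega
        rw [h2, List.getD_cons_succ]
        norm_num
    · simp only [loopR, if_neg hr0, if_neg hnw, if_neg hp] at hlen ⊢
      exact ih (o + 1) r f (by omega) (by omega) hr hlen (by omega)

theorem scan_miss (skip : String) :
    ∀ (k : Nat) (o : Int) (r fuel : Nat), (122 - o).toNat = k → 1 ≤ r →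
      (seg skip o).length < r → k < fuel →
      loopR skip fuel o r = loopR skip (fuel - k) 122 (r - (seg skip o).length) := by
  intro k
  induction k with
  | zero =>
    intro o r fuel hk hr hlen hfuel
    have ho : (122 : Int) ≤ o := by omega
    rw [seg_nil skip ho]
    obtain ⟨f, rfl⟩ : ∃ f, fuel = f + 1 := ⟨fuel - 1, by omega⟩
    simp only [List.length_nil, Nat.sub_zero]
    rw [wrap96 skip f ho hr, wrap96 skip f (o := 122) (by norm_num) hr]
  | succ k ih =>
    intro o r fuel hk hr hlen hfuel
    have ho' : o < 122 := by omega
    obtain ⟨f, rfl⟩ : ∃ f, fuel = f + 1 := ⟨fuel - 1, by omega⟩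
    have hr0 : ¬ r = 0 := by omega
    have hnw : ¬ (o + 1 > 122) := by omega
    rw [seg_cons skip ho'] at hlen ⊢
    by_cases hp : psk skip (o + 1)
    · simp only [loopR, if_neg hr0, if_neg hnw, if_pos hp, List.length_cons] at hlen ⊢
      rw [ih (o + 1) (r - 1) f (by omega) (by omega) (by omega) (by omega)]
      have e1 : f - k = f + 1 - (k + 1) := by omega
      have e2 : r - 1 - (seg skip (o + 1)).length = r - ((seg skip (o + 1)).length + 1) := by omega
      rw [e1, e2]
    · simp only [loopR, if_neg hr0, if_neg hnw, if_neg hp] at hlen ⊢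
      rw [ih (o + 1) r f (by omega) hr hlen (by omega)]
      have e1 : f - k = f + 1 - (k + 1) := by omega
      rw [e1]

theorem cyc (skip : String) :
    ∀ (r : Nat), 1 ≤ r → 1 ≤ (seg skip 96).length →
      ∀ (fuel : Nat) (o : Int), 122 ≤ o → 26 * r + 1 ≤ fuel →
      loopR skip fuel o r = (seg skip 96).getD ((r - 1) % (seg skip 96).length) 0 := by
  intro r
  induction r using Nat.strong_induction_on with
  | _ r ih =>
    intro hr hm fuel o ho hfuel
    obtain ⟨f, rfl⟩ : ∃ f, fuel = f + 1 := ⟨fuel - 1, by omega⟩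
    rw [wrap96 skip f ho hr]
    by_cases hcase : r ≤ (seg skip 96).length
    · rw [scan_hit skip 26 96 r (f + 1) (by decide) (by norm_num) hr hcase (by omega)]
      rw [Nat.mod_eq_of_lt (by omega)]
    · rw [scan_miss skip 26 96 r (f + 1) (by decide) hr (by omega) (by omega)]
      rw [ih (r - (seg skip 96).length) (by omega) (by omega) hm (f + 1 - 26) 122 (by norm_num)
        (by omega)]
      have h1 : r - 1 = (seg skip 96).length + (r - (seg skip 96).length - 1) := by omega
      rw [h1, Nat.add_mod_left]

theorem alphabet_eq (_u : Unit) :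
    "abcdefghijklmnopqrstuvwxyz".toList
      = (PySem.List.pyRange 97 123 1).map (fun i => Char.ofNat i.toNat) := by
  decide

theorem ofNat_toNat_char (c : Char) : Char.ofNat c.toNat = c :=
  Char.ofNat_toNat c

theorem charwise (skip : String) (index : Int) (c : Char)
    (hm : 1 ≤ (seg skip 96).length ∨ index ≤ ((seg skip (c.toNat : Int)).length : Int)) :
    Char.ofNat (solLoopA skip index (26 * index.toNat + 200) (c.toNat : Int) 1).toNat
      = (if index ≤ 0 then c
        else
          let o : Int := (c.toNat : Int)
          let tail := ((PySem.List.pyRange (o + 1) 123 1).map (fun i => Char.ofNat i.toNat)).filter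
            (fun c => !(skip.toList.contains c))
          if index ≤ (tail.length : Int) then (PySem.List.pyGet? tail (index - 1)).getD 'a'
          else
            let r := index - (tail.length : Int)
            (PySem.List.pyGet? ("abcdefghijklmnopqrstuvwxyz".toList.filter (fun c => !(skip.toList.contains c)))
              (PySem.Int.mod (r - 1) (("abcdefghijklmnopqrstuvwxyz".toList.filter (fun c => !(skip.toList.contains c))).length : Int))).getD 'a') := by
  by_cases hneg : index ≤ 0
  · rw [loopA_eq_loopR]
    have h0 : (index + 1 - 1).toNat = 0 := by omega
    rw [h0, loopR_zero, if_pos hneg]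
    have hcc : ((c.toNat : Int)).toNat = c.toNat := by omega
    rw [hcc, ofNat_toNat_char]
  · rw [loopA_eq_loopR]
    have hn1 : (index + 1 - 1).toNat = index.toNat := by omega
    rw [hn1]
    have hn1' : 1 ≤ index.toNat := by omega
    simp only [if_neg hneg]
    have htail : ((PySem.List.pyRange ((c.toNat : Int) + 1) 123 1).map (fun i => Char.ofNat i.toNat)).filter
        (fun x => !(skip.toList.contains x)) = (seg skip (c.toNat : Int)).map (fun i => Char.ofNat i.toNat) := by
      rw [List.filter_map]; rfl
    have hcyc : "abcdefghijklmnopqrstuvwxyz".toList.filter (fun x => !(skip.toList.contains x))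
        = (seg skip 96).map (fun i => Char.ofNat i.toNat) := by
      have h961 : (96 : Int) + 1 = 97 := by norm_num
      rw [alphabet_eq (), List.filter_map]
      unfold seg
      rw [h961]
      rfl
    rw [htail, List.length_map]
    by_cases hhit : index ≤ ((seg skip (c.toNat : Int)).length : Int)
    · have hle : (c.toNat : Int) ≤ 122 := by
        by_contra hlt
        rw [seg_nil skip (by omega)] at hhit
        simp at hhit; omega
      rw [if_pos hhit]
      rw [scan_hit skip (122 - (c.toNat : Int)).toNat _ index.toNat _ rfl hle hn1' (by omega) (by omega)]
      have hidx : index - 1 = ((index.toNat - 1 : Nat) : Int) := by omega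
      rw [hidx, PySem.List.pyGet?_natCast]
      have hlt' : index.toNat - 1 < ((seg skip (c.toNat : Int)).map (fun i => Char.ofNat i.toNat)).length := by
        simp; omega
      rw [List.getElem?_eq_getElem hlt']
      simp only [Option.getD_some]
      rw [List.getElem_map]
      rw [List.getD_eq_getElem _ _ (by omega)]
    · have hm1 : 1 ≤ (seg skip 96).length := by
        rcases hm with h | h
        · exact h
        · exact absurd h hhit
      rw [if_neg hhit]
      have hlen : (seg skip (c.toNat : Int)).length < index.toNat := by omega
      rw [scan_miss skip (122 - (c.toNat : Int)).toNat _ index.toNat _ rfl hn1' hlen (by omega)]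
      rw [cyc skip (index.toNat - (seg skip (c.toNat : Int)).length) (by omega) hm1 _ 122
        (by norm_num) (by omega)]
      rw [hcyc, List.length_map]
      generalize hLd : (seg skip (c.toNat : Int)).length = L at *
      generalize hSd : seg skip 96 = S at *
      have hmod : PySem.Int.mod (index - (L : Int) - 1) ((S.length : Nat) : Int)
          = (((index.toNat - L - 1) % S.length : Nat) : Int) := by
        rw [PySem.Int.mod_eq_emod_of_pos (by exact_mod_cast hm1)]
        have he : index - (L : Int) - 1 = ((index.toNat - L - 1 : Nat) : Int) := by omega
        rw [he]
        exact (Int.natCast_mod _ _).symm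
      rw [hmod, PySem.List.pyGet?_natCast]
      have hlt' : (index.toNat - L - 1) % S.length
          < (S.map (fun i => Char.ofNat i.toNat)).length := by
        simp
        exact Nat.mod_lt _ (by omega)
      rw [List.getElem?_eq_getElem hlt']
      simp only [Option.getD_some]
      rw [List.getElem_map]
      rw [List.getD_eq_getElem _ _ (Nat.mod_lt _ (by omega))]

-- ===== VERDICT (by name: the statement is the Claim_ definition above) =====
theorem solution_spec : Claim_equal_solution := by
  intro s skip index _hdom hpre
  unfold Spec_solution solution solution_alt
  have hmPre : ∀ c ∈ s.toList,
      1 ≤ (seg skip 96).length ∨ index ≤ ((seg skip (c.toNat : Int)).length : Int) := by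
    intro c hc
    rcases hpre with h0 | hex | hall
    · right
      have : (0 : Int) ≤ ((seg skip (c.toNat : Int)).length : Int) := Int.natCast_nonneg _
      omega
    · left
      obtain ⟨a, ha, hna⟩ := hex
      rw [alphabet_eq ()] at ha
      obtain ⟨i, hi, rfl⟩ := List.mem_map.1 ha
      rw [PySem.List.mem_pyRange_one] at hi
      have hmem : i ∈ seg skip 96 := by
        unfold seg
        refine List.mem_filter.2 ⟨?_, ?_⟩
        · rw [PySem.List.mem_pyRange_one]
          constructor <;> omega
        · unfold psk
          rw [hna]
          rfl
      exact List.length_pos_of_mem hmem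
    · right
      exact hall c hc
  rw [PySem.List.foldl_append_singleton_eq_map]
  simp only [List.nil_append]
  congr 1
  apply List.map_congr_left
  intro c hc
  exact charwise skip index c (hmPre c hc)
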